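-- pv_equiv track=rewrite | github.com/buddy-compiler/buddy-mlir | tests/Python/AtenOpsCoverage/collect_unique_native_numeric_coverage.py | _pick_best_overload
-- ===== SOURCE A (Python) =====
-- from typing import Any, Dict, Iterable, List
--
-- PREFERRED_UNIQUE_OVERLOAD: Dict[str, str] = {
--     "eq": "Tensor",
--     "ge": "Tensor",
--     "gt": "Tensor",
--     "le": "Tensor",
--     "lt": "Tensor",
--     "ne": "Tensor",
--     "sub": "Tensor",
--     "where": "self",
-- }
--
-- def _pick_best_overload(op: str, overloads: Iterable[str]) -> str:
--     priority = (
--         "default",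
--         "Tensor",
--         "self",
--         "Tensor_out",
--         "out",
--     )
--     items = list(overloads)
--     preferred = PREFERRED_UNIQUE_OVERLOAD.get(op)
--     if preferred and preferred in items:
--         return preferred
--     for want in priority:
--         if want in items:
--             return want
--     return items[0]
-- ===== SOURCE B (Python) =====
-- from typing import Dict, Iterable
--
-- PREFERRED_UNIQUE_OVERLOAD: Dict[str, str] = {
--     "eq": "Tensor",
--     "ge": "Tensor",
--     "gt": "Tensor",
--     "le": "Tensor",
--     "lt": "Tensor",
--     "ne": "Tensor",
--     "sub": "Tensor",
--     "where": "self",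
-- }
--
-- _PRIORITY = ("default", "Tensor", "self", "Tensor_out", "out")
-- _RANK = {name: i for i, name in enumerate(_PRIORITY)}
-- _SENTINEL = len(_PRIORITY)
--
-- def _pick_best_overload(op, overloads):
--     items = list(overloads)
--     preferred = PREFERRED_UNIQUE_OVERLOAD.get(op)
--     if preferred and preferred in items:
--         return preferred
--     best, best_rank = items[0], _SENTINEL
--     for item in items:
--         r = _RANK.get(item, _SENTINEL)
--         if r < best_rank:
--             best, best_rank = item, r
--     return best
-- ===== Notes on version B (the rewrite author's own statement) =====
-- stated objective: alternative
-- what changed: Instead of scanning the priority tuple and testing membership of each name in items, B builds a name->rank table once and makes a single pass over items keeping the item of smallest rank, falling back to items[0].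
import Mathlib
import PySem

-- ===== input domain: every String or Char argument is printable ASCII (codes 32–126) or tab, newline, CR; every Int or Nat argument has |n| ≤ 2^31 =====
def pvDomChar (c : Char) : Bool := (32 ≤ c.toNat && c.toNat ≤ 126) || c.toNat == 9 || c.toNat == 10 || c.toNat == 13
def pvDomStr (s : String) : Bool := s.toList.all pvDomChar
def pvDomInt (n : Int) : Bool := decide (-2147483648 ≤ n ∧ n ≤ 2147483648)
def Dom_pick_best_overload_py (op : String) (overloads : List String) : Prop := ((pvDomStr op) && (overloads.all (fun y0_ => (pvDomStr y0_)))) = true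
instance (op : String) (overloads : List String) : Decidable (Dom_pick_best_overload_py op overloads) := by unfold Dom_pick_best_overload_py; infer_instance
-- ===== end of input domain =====

-- B replaces A's scan over the priority tuple (membership test per name) by one pass over the
-- items keeping the item of smallest rank from a name→rank table; return values proved equal.

-- module constant PREFERRED_UNIQUE_OVERLOAD (shared by both Python files verbatim)
def pvPreferred : PySem.Dict String String := PySem.Dict.ofList
  [("eq", "Tensor"), ("ge", "Tensor"), ("gt", "Tensor"), ("le", "Tensor"),
   ("lt", "Tensor"), ("ne", "Tensor"), ("sub", "Tensor"), ("where", "self")]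

-- ===== PORT A =====
def pvPriority : List String := ["default", "Tensor", "self", "Tensor_out", "out"]

-- 'for want in priority: if want in items: return want'
def pvFindPrio : List String → List String → Option String
  | [], _ => none
  | w :: ws, items => if items.contains w then some w else pvFindPrio ws items

-- the loop + 'return items[0]' fallback ('' only where Python raises IndexError, excluded by Pre_)
def pvScanA (items : List String) : String :=
  match pvFindPrio pvPriority items with
  | some w => w
  | none => (PySem.List.pyGet? items 0).getD ""

def pick_best_overload_py (op : String) (overloads : List String) : String :=
  let items := overloads
  match pvPreferred.get? op with
  | some p => if (p != "") && items.contains p then p else pvScanA items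
  | none => pvScanA items

-- ===== PORT B =====
def pvPriorityB : List String := ["default", "Tensor", "self", "Tensor_out", "out"]

-- _RANK = {name: i for i, name in enumerate(_PRIORITY)}; _SENTINEL = len(_PRIORITY) = 5
def pvRank : PySem.Dict String Nat := PySem.Dict.ofList pvPriorityB.zipIdx

-- _RANK.get(item, _SENTINEL)
def pvRankOf (s : String) : Nat := pvRank.getD s 5

-- loop body: keep the item with the strictly smallest rank seen so far
def pvStep (b : String × Nat) (item : String) : String × Nat :=
  if pvRankOf item < b.2 then (item, pvRankOf item) else b

-- best = items[0]; best_rank = sentinel; for item in items: …; return best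
def pvBest (items : List String) : String :=
  (items.foldl pvStep ((PySem.List.pyGet? items 0).getD "", 5)).1

def pick_best_overload_py_alt (op : String) (overloads : List String) : String :=
  let items := overloads
  match pvPreferred.get? op with
  | some p => if (p != "") && items.contains p then p else pvBest items
  | none => pvBest items

-- ===== PRECONDITION & SPEC =====
-- Python A raises IndexError at items[0] when overloads is empty; that is the only raise.
def Pre_pick_best_overload_py (op : String) (overloads : List String) : Prop := overloads ≠ []
instance (op : String) (overloads : List String) : Decidable (Pre_pick_best_overload_py op overloads) := by unfold Pre_pick_best_overload_py; infer_instance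

def pvWitness_pick_best_overload_py : String × List String := ("eq", ["out", "Tensor"])

def Spec_pick_best_overload_py (op : String) (overloads : List String) (out : String) : Prop := out = pick_best_overload_py_alt op overloads
instance (op : String) (overloads : List String) (out : String) : Decidable (Spec_pick_best_overload_py op overloads out) := by unfold Spec_pick_best_overload_py; infer_instance

-- ===== CLAIM (what is proved, stated in full; the proofs are below) =====
def Claim_equal_pick_best_overload_py : Prop := ∀ (op : String) (overloads : List String), Dom_pick_best_overload_py op overloads → Pre_pick_best_overload_py op overloads → Spec_pick_best_overload_py op overloads (pick_best_overload_py op overloads)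

-- ===== LEMMAS AND PROOFS =====

-- proof-side: the rank of a string, and the minimal rank occurring in a list
def pvPrioName (j : Nat) : String := pvPriority.getD j ""

def pvMr : List String → Nat
  | [] => 5
  | i :: rest => min (pvRankOf i) (pvMr rest)

theorem pvRankOf_eq (s : String) : pvRankOf s =
    (if s = "default" then 0 else if s = "Tensor" then 1 else if s = "self" then 2
     else if s = "Tensor_out" then 3 else if s = "out" then 4 else 5) := by
  have hmk : pvRank = PySem.Dict.mk [("default", 0), ("Tensor", 1), ("self", 2), ("Tensor_out", 3), ("out", 4)] := by decide
  split_ifs with h1 h2 h3 h4 h5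
  · subst h1; decide
  · subst h2; decide
  · subst h3; decide
  · subst h4; decide
  · subst h5; decide
  · rw [pvRankOf, hmk, PySem.Dict.getD_of_not_contains]
    simp [PySem.Dict.contains_mk]
    exact ⟨fun h => h1 h.symm, fun h => h2 h.symm, fun h => h3 h.symm, fun h => h4 h.symm, fun h => h5 h.symm⟩

theorem pvRankOf_le_5 (s : String) : pvRankOf s ≤ 5 := by
  rw [pvRankOf_eq]; split_ifs <;> omega

theorem pvPrioName_rankOf (s : String) (h : pvRankOf s < 5) : pvPrioName (pvRankOf s) = s := by
  rw [pvRankOf_eq] at *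
  split_ifs at * <;> subst_vars <;> first | rfl | omega

theorem pvRankOf_inj (s : String) (j : Nat) (hj : j < 5) (h : pvRankOf s = j) :
    s = pvPrioName j := by
  have := pvPrioName_rankOf s (by omega)
  rw [h] at this; exact this.symm

theorem pvMr_le_of_mem (items : List String) (i : String) (hi : i ∈ items) :
    pvMr items ≤ pvRankOf i := by
  induction items with
  | nil => cases hi
  | cons x xs ih =>
    rcases List.mem_cons.mp hi with rfl | hi
    · simp only [pvMr]; omega
    · have := ih hi; simp only [pvMr]; omega

theorem pvMr_attained (items : List String) (h : pvMr items < 5) :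
    ∃ i ∈ items, pvRankOf i = pvMr items := by
  induction items with
  | nil => simp [pvMr] at h
  | cons x xs ih =>
    simp only [pvMr] at h ⊢
    by_cases hx : pvRankOf x ≤ pvMr xs
    · exact ⟨x, List.mem_cons_self, by omega⟩
    · obtain ⟨i, hi, hri⟩ := ih (by omega)
      exact ⟨i, List.mem_cons_of_mem _ hi, by omega⟩

theorem pvMr_ne_of_not_mem (items : List String) (j : Nat) (hj : j < 5)
    (hc : pvPrioName j ∉ items) : pvMr items ≠ j := by
  intro h
  obtain ⟨i, hi, hri⟩ := pvMr_attained items (by omega)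
  have : i = pvPrioName j := pvRankOf_inj i j hj (by omega)
  subst this
  exact hc hi

theorem pvMr_le_of_mem_name (items : List String) (j : Nat)
    (hc : pvPrioName j ∈ items) (hr : pvRankOf (pvPrioName j) = j) :
    pvMr items ≤ j := by
  have := pvMr_le_of_mem items _ hc
  omega

-- B's fold characterised
theorem pvFoldB (items : List String) : ∀ (b : String) (n : Nat), n ≤ 5 →
    items.foldl pvStep (b, n) =
      if pvMr items < n then (pvPrioName (pvMr items), pvMr items) else (b, n) := by
  induction items with
  | nil => intro b n hn; simp only [List.foldl_nil, pvMr]; rw [if_neg (by omega)]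
  | cons i rest ih =>
    intro b n hn
    simp only [List.foldl_cons, pvStep, pvMr]
    by_cases hr : pvRankOf i < n
    · rw [if_pos hr, ih i (pvRankOf i) (pvRankOf_le_5 i)]
      have h5 : pvRankOf i < 5 := by omega
      by_cases hm : pvMr rest < pvRankOf i
      · rw [if_pos hm, if_pos (by omega), Nat.min_eq_right (by omega)]
      · rw [if_neg hm, Nat.min_eq_left (by omega), if_pos hr, pvPrioName_rankOf i h5]
    · rw [if_neg hr, ih b n hn]
      by_cases hm : pvMr rest < n
      · rw [if_pos hm, if_pos (by omega), Nat.min_eq_right (by omega)]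
      · rw [if_neg hm, if_neg (by omega)]

-- A's scan characterised
theorem pvScanA_eq (items : List String) : pvScanA items =
    if pvMr items < 5 then pvPrioName (pvMr items) else (PySem.List.pyGet? items 0).getD "" := by
  have rk0 : pvRankOf "default" = 0 := by decide
  have rk1 : pvRankOf "Tensor" = 1 := by decide
  have rk2 : pvRankOf "self" = 2 := by decide
  have rk3 : pvRankOf "Tensor_out" = 3 := by decide
  have rk4 : pvRankOf "out" = 4 := by decide
  by_cases c0 : "default" ∈ items
  · have h := pvMr_le_of_mem_name items 0 c0 rk0
    have hm : pvMr items = 0 := by omega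
    simp [pvScanA, pvFindPrio, pvPriority, c0, hm, pvPrioName]
  · have n0 := pvMr_ne_of_not_mem items 0 (by omega) c0
    by_cases c1 : "Tensor" ∈ items
    · have h := pvMr_le_of_mem_name items 1 c1 rk1
      have hm : pvMr items = 1 := by omega
      simp [pvScanA, pvFindPrio, pvPriority, c0, c1, hm, pvPrioName]
    · have n1 := pvMr_ne_of_not_mem items 1 (by omega) c1
      by_cases c2 : "self" ∈ items
      · have h := pvMr_le_of_mem_name items 2 c2 rk2
        have hm : pvMr items = 2 := by omega
        simp [pvScanA, pvFindPrio, pvPriority, c0, c1, c2, hm, pvPrioName]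
      · have n2 := pvMr_ne_of_not_mem items 2 (by omega) c2
        by_cases c3 : "Tensor_out" ∈ items
        · have h := pvMr_le_of_mem_name items 3 c3 rk3
          have hm : pvMr items = 3 := by omega
          simp [pvScanA, pvFindPrio, pvPriority, c0, c1, c2, c3, hm, pvPrioName]
        · have n3 := pvMr_ne_of_not_mem items 3 (by omega) c3
          by_cases c4 : "out" ∈ items
          · have h := pvMr_le_of_mem_name items 4 c4 rk4
            have hm : pvMr items = 4 := by omega
            simp [pvScanA, pvFindPrio, pvPriority, c0, c1, c2, c3, c4, hm, pvPrioName]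
          · have n4 := pvMr_ne_of_not_mem items 4 (by omega) c4
            have h5 : ¬ pvMr items < 5 := by omega
            simp [pvScanA, pvFindPrio, pvPriority, c0, c1, c2, c3, c4, h5]

theorem pvBest_eq_scanA (items : List String) : pvBest items = pvScanA items := by
  rw [pvBest, pvFoldB items _ 5 (le_refl 5), pvScanA_eq]
  by_cases h : pvMr items < 5 <;> simp [h]

-- ===== VERDICT (by name: the statement is the Claim_ definition above) =====
theorem pick_best_overload_py_spec : Claim_equal_pick_best_overload_py := by
  intro op overloads _ _
  unfold Spec_pick_best_overload_py pick_best_overload_py pick_best_overload_py_alt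
  cases h : pvPreferred.get? op with
  | none => simp [pvBest_eq_scanA]
  | some p =>
    simp [pvBest_eq_scanA]
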